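-- pv_equiv track=rewrite | github.com/1406aky-source/MOBILE-ADDICTION-DETECTOR | utils/rule_engine.py | _meta_conclusion
-- ===== SOURCE A (Python) =====
-- def _meta_conclusion(fired: list) -> str:
--     """Derive top-level conclusion from fired rules."""
--     if not fired:
--         return "No significant risk patterns detected."
--     critical = [r for r in fired if r["severity"] == "critical"]
--     high = [r for r in fired if r["severity"] == "high"]
--     positive = [r for r in fired if r["severity"] == "positive"]
--
--     if critical:
--         return f"CRITICAL: {len(critical)} critical rule(s) fired. Immediate intervention required."
--     elif len(high) >= 2:
--         return f"HIGH RISK: Multiple high-severity patterns detected ({len(high)} rules)."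
--     elif high:
--         return f"ELEVATED RISK: {high[0]['conclusion']}."
--     elif positive and len(positive) >= 2:
--         return "POSITIVE: Multiple healthy patterns detected. Keep it up!"
--     else:
--         return f"{len(fired)} behavioral pattern(s) identified. Monitor closely."
-- ===== SOURCE B (Python) =====
-- _SEVERITY_ORDER = {"critical": 0, "high": 1, "positive": 2}
--
-- def _meta_conclusion(fired: list) -> str:
--     """Derive top-level conclusion from fired rules.
--
--     Stable-sorts the rules by severity rank (critical < high < positive < other)
--     and reads the verdict off the leading run of the sorted list.
--     """
--     if not fired:
--         return "No significant risk patterns detected."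
--     ordered = sorted(fired, key=lambda r: _SEVERITY_ORDER.get(r["severity"], 3))
--     lead = _SEVERITY_ORDER.get(ordered[0]["severity"], 3)
--     run = 1
--     while run < len(ordered) and _SEVERITY_ORDER.get(ordered[run]["severity"], 3) == lead:
--         run += 1
--     if lead == 0:
--         return f"CRITICAL: {run} critical rule(s) fired. Immediate intervention required."
--     if lead == 1:
--         if run >= 2:
--             return f"HIGH RISK: Multiple high-severity patterns detected ({run} rules)."
--         return f"ELEVATED RISK: {ordered[0]['conclusion']}."
--     if lead == 2 and run >= 2:
--         return "POSITIVE: Multiple healthy patterns detected. Keep it up!"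
--     return f"{len(fired)} behavioral pattern(s) identified. Monitor closely."
-- ===== Notes on version B (the rewrite author's own statement) =====
-- stated objective: alternative
-- what changed: B stable-sorts the rules by a severity rank (critical<high<positive<other) and derives the verdict from the leading run of the sorted list (its rank, its length, and its first element), instead of A's three severity-filter passes feeding a branch ladder over the filtered lists.
import Mathlib
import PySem

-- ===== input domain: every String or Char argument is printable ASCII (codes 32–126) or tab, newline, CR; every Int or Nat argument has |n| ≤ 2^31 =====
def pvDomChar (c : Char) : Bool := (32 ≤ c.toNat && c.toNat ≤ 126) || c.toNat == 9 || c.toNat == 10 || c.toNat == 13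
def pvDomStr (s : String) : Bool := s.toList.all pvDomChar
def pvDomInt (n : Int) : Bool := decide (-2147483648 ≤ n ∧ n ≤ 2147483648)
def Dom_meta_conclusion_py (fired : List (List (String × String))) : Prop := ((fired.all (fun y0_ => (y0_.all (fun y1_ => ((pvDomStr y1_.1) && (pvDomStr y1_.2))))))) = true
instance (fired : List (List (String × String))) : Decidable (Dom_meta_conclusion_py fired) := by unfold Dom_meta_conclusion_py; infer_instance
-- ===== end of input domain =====

-- B replaces A's three filtering passes + branch ladder by a stable sort on severity rank (critical<high<positive<other) and a single leading-run scan of the sorted list; return value proved equal on Pre_.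


-- ===== PORT A =====
-- r["severity"] / r["conclusion"]: ported as Dict.getD with default "" — Pre_ guarantees the key is present wherever Python reads it (Python raises KeyError otherwise).
def meta_conclusion_py (fired : List (List (String × String))) : String :=
  if fired.isEmpty then "No significant risk patterns detected."
  else
    let critical := fired.filter (fun r => PySem.Dict.getD (PySem.Dict.mk r) "severity" "" == "critical")
    let high := fired.filter (fun r => PySem.Dict.getD (PySem.Dict.mk r) "severity" "" == "high")
    let positive := fired.filter (fun r => PySem.Dict.getD (PySem.Dict.mk r) "severity" "" == "positive")
    if !critical.isEmpty then
      "CRITICAL: " ++ PySem.Int.toStr (PySem.List.len critical) ++ " critical rule(s) fired. Immediate intervention required."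
    else if 2 ≤ PySem.List.len high then
      "HIGH RISK: Multiple high-severity patterns detected (" ++ PySem.Int.toStr (PySem.List.len high) ++ " rules)."
    else if !high.isEmpty then
      "ELEVATED RISK: " ++ PySem.Dict.getD (PySem.Dict.mk (PySem.List.pyGetD high 0 [])) "conclusion" "" ++ "."
    else if !positive.isEmpty && 2 ≤ PySem.List.len positive then
      "POSITIVE: Multiple healthy patterns detected. Keep it up!"
    else
      PySem.Int.toStr (PySem.List.len fired) ++ " behavioral pattern(s) identified. Monitor closely."

-- ===== PORT B =====
-- the module-level _SEVERITY_ORDER dict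
def pySevOrder : PySem.Dict String Int := PySem.Dict.mk [("critical", 0), ("high", 1), ("positive", 2)]
-- _SEVERITY_ORDER.get(r["severity"], 3), B's sort key (r["severity"]: see the KeyError note above Port A)
def sevRank (r : List (String × String)) : Int :=
  PySem.Dict.getD pySevOrder (PySem.Dict.getD (PySem.Dict.mk r) "severity" "") 3
-- B's while loop: counts how many further leading elements still have rank `lead`, stopping at the first mismatch
def runFrom (lead : Int) : List (List (String × String)) → Int
  | [] => 0
  | y :: ys => if sevRank y == lead then 1 + runFrom lead ys else 0

def meta_conclusion_py_alt (fired : List (List (String × String))) : String :=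
  if fired.isEmpty then "No significant risk patterns detected."
  else
    let ordered := PySem.List.sorted fired sevRank false
    let lead := sevRank (PySem.List.pyGetD ordered 0 [])
    let run : Int := 1 + runFrom lead ordered.tail
    if lead == 0 then
      "CRITICAL: " ++ PySem.Int.toStr run ++ " critical rule(s) fired. Immediate intervention required."
    else if lead == 1 then
      if 2 ≤ run then
        "HIGH RISK: Multiple high-severity patterns detected (" ++ PySem.Int.toStr run ++ " rules)."
      else
        "ELEVATED RISK: " ++ PySem.Dict.getD (PySem.Dict.mk (PySem.List.pyGetD ordered 0 [])) "conclusion" "" ++ "."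
    else if lead == 2 && 2 ≤ run then
      "POSITIVE: Multiple healthy patterns detected. Keep it up!"
    else
      PySem.Int.toStr (PySem.List.len fired) ++ " behavioral pattern(s) identified. Monitor closely."

-- ===== PRECONDITION & SPEC =====
-- Pre_ excludes exactly the inputs where Python raises KeyError: some rule lacks the "severity" key, or the ELEVATED branch (no critical, exactly one high rule) reads a missing "conclusion" key.
def Pre_meta_conclusion_py (fired : List (List (String × String))) : Prop :=
  (∀ r ∈ fired, ((PySem.Dict.mk r).get? "severity").isSome = true) ∧
  ((fired.filter (fun r => PySem.Dict.getD (PySem.Dict.mk r) "severity" "" == "critical")).isEmpty = true →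
   (fired.filter (fun r => PySem.Dict.getD (PySem.Dict.mk r) "severity" "" == "high")).length = 1 →
   ((PySem.Dict.mk ((fired.filter (fun r => PySem.Dict.getD (PySem.Dict.mk r) "severity" "" == "high")).headD [])).get? "conclusion").isSome = true)
instance (fired : List (List (String × String))) : Decidable (Pre_meta_conclusion_py fired) := by unfold Pre_meta_conclusion_py; infer_instance
def pvWitness_meta_conclusion_py : (List (List (String × String))) := [[("severity", "critical")]]
def Spec_meta_conclusion_py (fired : List (List (String × String))) (out : String) : Prop := out = meta_conclusion_py_alt fired
instance (fired : List (List (String × String))) (out : String) : Decidable (Spec_meta_conclusion_py fired out) := by unfold Spec_meta_conclusion_py; infer_instance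

-- ===== CLAIM (what is proved, stated in full; the proofs are below) =====
def Claim_equal_meta_conclusion_py : Prop := ∀ (fired : List (List (String × String))), Dom_meta_conclusion_py fired → Pre_meta_conclusion_py fired → Spec_meta_conclusion_py fired (meta_conclusion_py fired)

-- ===== LEMMAS AND PROOFS =====

-- sevRank written out as the four-way test on the severity string
theorem sevRank_eq (r : List (String × String)) : sevRank r =
    (if PySem.Dict.getD (PySem.Dict.mk r) "severity" "" = "critical" then (0:Int)
     else if PySem.Dict.getD (PySem.Dict.mk r) "severity" "" = "high" then 1
     else if PySem.Dict.getD (PySem.Dict.mk r) "severity" "" = "positive" then 2 else 3) := by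
  unfold sevRank pySevOrder
  generalize PySem.Dict.getD (PySem.Dict.mk r) "severity" "" = s
  by_cases h1 : s = "critical"
  · subst h1; decide
  · by_cases h2 : s = "high"
    · subst h2; decide
    · by_cases h3 : s = "positive"
      · subst h3; decide
      · have b1 : ("critical" == s) = false := beq_eq_false_iff_ne.2 (fun h => h1 h.symm)
        have b2 : ("high" == s) = false := beq_eq_false_iff_ne.2 (fun h => h2 h.symm)
        have b3 : ("positive" == s) = false := beq_eq_false_iff_ne.2 (fun h => h3 h.symm)
        simp [PySem.Dict.getD, PySem.Dict.get?, List.find?, b1, b2, b3, h1, h2, h3]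

theorem sevRank_cases (r : List (String × String)) :
    sevRank r = 0 ∨ sevRank r = 1 ∨ sevRank r = 2 ∨ sevRank r = 3 := by
  rw [sevRank_eq]; split_ifs <;> simp

-- insertion into a list split at x's insertion point
theorem insertBy_mid {α : Type} (before : α → α → Bool) (x : α) (l m : List α)
    (hl : ∀ y ∈ l, before x y = false) (hm : ∀ y ∈ m, before x y = true) :
    PySem.List.insertBy before x (l ++ m) = l ++ x :: m := by
  induction l with
  | nil =>
    cases m with
    | nil => simp [PySem.List.insertBy]
    | cons z zs => simp [PySem.List.insertBy, hm z (by simp)]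
  | cons y ys ih =>
    have hy := hl y (by simp)
    simp only [List.cons_append, PySem.List.insertBy, hy, Bool.false_eq_true, if_false]
    rw [ih (fun y hy => hl y (by simp [hy]))]

-- the stable insertion sort by sevRank produces the four rank groups in order, each in original order
theorem foldl_ins_decomp (xs : List (List (String × String))) (p0 p1 p2 p3 : List (List (String × String)))
    (h0 : ∀ y ∈ p0, sevRank y = 0) (h1 : ∀ y ∈ p1, sevRank y = 1)
    (h2 : ∀ y ∈ p2, sevRank y = 2) (h3 : ∀ y ∈ p3, sevRank y = 3) :
    xs.foldl (fun acc x => PySem.List.insertBy (fun a b => decide (sevRank a < sevRank b)) x acc)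
        (p0 ++ p1 ++ p2 ++ p3) =
      (p0 ++ xs.filter (fun y => sevRank y == 0)) ++ (p1 ++ xs.filter (fun y => sevRank y == 1)) ++
      (p2 ++ xs.filter (fun y => sevRank y == 2)) ++ (p3 ++ xs.filter (fun y => sevRank y == 3)) := by
  induction xs generalizing p0 p1 p2 p3 with
  | nil => simp
  | cons x rest ih =>
    simp only [List.foldl_cons]
    rcases sevRank_cases x with hx | hx | hx | hx
    · rw [show p0 ++ p1 ++ p2 ++ p3 = p0 ++ (p1 ++ p2 ++ p3) by simp,
        insertBy_mid _ _ p0 (p1 ++ p2 ++ p3)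
          (fun y hy => by simp [h0 y hy, hx])
          (fun y hy => by
            simp only [List.append_assoc, List.mem_append] at hy
            rcases hy with hy | hy | hy
            · simp [h1 y hy, hx]
            · simp [h2 y hy, hx]
            · simp [h3 y hy, hx]),
        show p0 ++ x :: (p1 ++ p2 ++ p3) = (p0 ++ [x]) ++ p1 ++ p2 ++ p3 by simp,
        ih (p0 ++ [x]) p1 p2 p3
          (fun y hy => by rcases List.mem_append.1 hy with h | h; exact h0 y h; simp_all) h1 h2 h3]
      simp [hx]
    · rw [show p0 ++ p1 ++ p2 ++ p3 = (p0 ++ p1) ++ (p2 ++ p3) by simp,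
        insertBy_mid _ _ (p0 ++ p1) (p2 ++ p3)
          (fun y hy => by
            rcases List.mem_append.1 hy with h | h
            · simp [h0 y h, hx]
            · simp [h1 y h, hx])
          (fun y hy => by
            rcases List.mem_append.1 hy with h | h
            · simp [h2 y h, hx]
            · simp [h3 y h, hx]),
        show (p0 ++ p1) ++ x :: (p2 ++ p3) = p0 ++ (p1 ++ [x]) ++ p2 ++ p3 by simp,
        ih p0 (p1 ++ [x]) p2 p3 h0
          (fun y hy => by rcases List.mem_append.1 hy with h | h; exact h1 y h; simp_all) h2 h3]
      simp [hx]
    · rw [show p0 ++ p1 ++ p2 ++ p3 = (p0 ++ p1 ++ p2) ++ p3 by simp,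
        insertBy_mid _ _ (p0 ++ p1 ++ p2) p3
          (fun y hy => by
            simp only [List.append_assoc, List.mem_append] at hy
            rcases hy with h | h | h
            · simp [h0 y h, hx]
            · simp [h1 y h, hx]
            · simp [h2 y h, hx])
          (fun y hy => by simp [h3 y hy, hx]),
        show (p0 ++ p1 ++ p2) ++ x :: p3 = p0 ++ p1 ++ (p2 ++ [x]) ++ p3 by simp,
        ih p0 p1 (p2 ++ [x]) p3 h0 h1
          (fun y hy => by rcases List.mem_append.1 hy with h | h; exact h2 y h; simp_all) h3]
      simp [hx]
    · rw [PySem.List.insertBy_of_forall_not_before _ x (p0 ++ p1 ++ p2 ++ p3)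
          (fun y hy => by
            simp only [List.append_assoc, List.mem_append] at hy
            rcases hy with h | h | h | h
            · simp [h0 y h, hx]
            · simp [h1 y h, hx]
            · simp [h2 y h, hx]
            · simp [h3 y h, hx])]
      rw [show (p0 ++ p1 ++ p2 ++ p3) ++ [x] = p0 ++ p1 ++ p2 ++ (p3 ++ [x]) by simp,
        ih p0 p1 p2 (p3 ++ [x]) h0 h1 h2
          (fun y hy => by rcases List.mem_append.1 hy with h | h; exact h3 y h; simp_all)]
      simp [hx]

theorem sorted_decomp (xs : List (List (String × String))) :
    PySem.List.sorted xs sevRank false =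
      xs.filter (fun y => sevRank y == 0) ++ xs.filter (fun y => sevRank y == 1) ++
      xs.filter (fun y => sevRank y == 2) ++ xs.filter (fun y => sevRank y == 3) := by
  rw [PySem.List.sorted_eq_foldl_insertBy]
  have := foldl_ins_decomp xs [] [] [] [] (by simp) (by simp) (by simp) (by simp)
  simpa using this

theorem runFrom_nil_of_ne (k : Int) (m : List (List (String × String)))
    (hm : ∀ y ∈ m, sevRank y ≠ k) : runFrom k m = 0 := by
  cases m with
  | nil => rfl
  | cons z zs => simp [runFrom, hm z (by simp)]

theorem runFrom_append (k : Int) (l m : List (List (String × String)))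
    (hl : ∀ y ∈ l, sevRank y = k) (hm : ∀ y ∈ m, sevRank y ≠ k) :
    runFrom k (l ++ m) = (l.length : Int) := by
  induction l with
  | nil => simpa using runFrom_nil_of_ne k m hm
  | cons y ys ih =>
    simp only [List.cons_append, runFrom, hl y (by simp), beq_self_eq_true, if_true,
      ih (fun y hy => hl y (by simp [hy]))]
    simp only [List.length_cons]
    push_cast
    omega

-- A's severity filters are exactly the rank filters
theorem filter_crit_eq (xs : List (List (String × String))) :
    xs.filter (fun r => PySem.Dict.getD (PySem.Dict.mk r) "severity" "" == "critical") =
      xs.filter (fun y => sevRank y == 0) := by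
  apply List.filter_congr
  intro r _
  rw [sevRank_eq]; split_ifs <;> simp_all

theorem filter_high_eq (xs : List (List (String × String))) :
    xs.filter (fun r => PySem.Dict.getD (PySem.Dict.mk r) "severity" "" == "high") =
      xs.filter (fun y => sevRank y == 1) := by
  apply List.filter_congr
  intro r _
  rw [sevRank_eq]; split_ifs <;> simp_all

theorem filter_pos_eq (xs : List (List (String × String))) :
    xs.filter (fun r => PySem.Dict.getD (PySem.Dict.mk r) "severity" "" == "positive") =
      xs.filter (fun y => sevRank y == 2) := by
  apply List.filter_congr
  intro r _
  rw [sevRank_eq]; split_ifs <;> simp_all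

theorem mem_rank_filter {i : Int} {y : List (String × String)} {xs : List (List (String × String))}
    (h : y ∈ xs.filter (fun y => sevRank y == i)) : sevRank y = i := by
  have := (List.mem_filter.1 h).2; simpa using this

-- ===== VERDICT (by name: the statement is the Claim_ definition above) =====
theorem meta_conclusion_py_spec : Claim_equal_meta_conclusion_py := by
  intro fired _ _
  unfold Spec_meta_conclusion_py meta_conclusion_py meta_conclusion_py_alt
  by_cases he : fired.isEmpty
  · simp [he]
  · simp only [he, Bool.false_eq_true, if_false, filter_crit_eq, filter_high_eq, filter_pos_eq,
      sorted_decomp]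
    set F0 := fired.filter (fun y => sevRank y == 0) with hF0
    set F1 := fired.filter (fun y => sevRank y == 1) with hF1
    set F2 := fired.filter (fun y => sevRank y == 2) with hF2
    set F3 := fired.filter (fun y => sevRank y == 3) with hF3
    have m0 : ∀ y ∈ F0, sevRank y = 0 := fun y hy => mem_rank_filter hy
    have m1 : ∀ y ∈ F1, sevRank y = 1 := fun y hy => mem_rank_filter hy
    have m2 : ∀ y ∈ F2, sevRank y = 2 := fun y hy => mem_rank_filter hy
    have m3 : ∀ y ∈ F3, sevRank y = 3 := fun y hy => mem_rank_filter hy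
    rcases hc0 : F0 with _ | ⟨x0, t0⟩
    · rcases hc1 : F1 with _ | ⟨x1, t1⟩
      · rcases hc2 : F2 with _ | ⟨x2, t2⟩
        · -- only "other" rules; fired nonempty ⇒ F3 nonempty
          rcases hc3 : F3 with _ | ⟨x3, t3⟩
          · exfalso
            rcases List.isEmpty_eq_false_iff_exists_mem.1 (by simpa using he) with ⟨x, hx⟩
            rcases sevRank_cases x with h | h | h | h
            · have : x ∈ F0 := List.mem_filter.2 ⟨hx, by simp [h]⟩; simp [hc0] at this
            · have : x ∈ F1 := List.mem_filter.2 ⟨hx, by simp [h]⟩; simp [hc1] at this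
            · have : x ∈ F2 := List.mem_filter.2 ⟨hx, by simp [h]⟩; simp [hc2] at this
            · have : x ∈ F3 := List.mem_filter.2 ⟨hx, by simp [h]⟩; simp [hc3] at this
          · have hx3 : sevRank x3 = 3 := m3 x3 (by simp [hc3])
            simp [PySem.List.pyGetD, hx3, PySem.List.len]
        · -- positives lead
          have hx2 : sevRank x2 = 2 := m2 x2 (by simp [hc2])
          have hrun : runFrom 2 (t2 ++ F3) = (t2.length : Int) :=
            runFrom_append 2 t2 F3 (fun y hy => m2 y (by simp [hc2, hy]))
              (fun y hy => by simp [m3 y hy])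
          simp only [List.nil_append, List.cons_append, List.tail_cons]
          simp only [show ∀ m : List (List (String × String)), PySem.List.pyGetD (x2 :: m) 0 [] = x2
            from fun m => by simp [PySem.List.pyGetD], hx2, hrun]
          have hlen : PySem.List.len (x2 :: t2) = (t2.length : Int) + 1 := by
            simp [PySem.List.len]
          simp only [hlen]
          simp [Int.add_comm]
      · -- highs lead
        have hx1 : sevRank x1 = 1 := m1 x1 (by simp [hc1])
        have hrun : runFrom 1 (t1 ++ (F2 ++ F3)) = (t1.length : Int) :=
          runFrom_append 1 t1 (F2 ++ F3) (fun y hy => m1 y (by simp [hc1, hy]))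
            (fun y hy => by
              rcases List.mem_append.1 hy with h | h
              · simp [m2 y h]
              · simp [m3 y h])
        simp only [List.nil_append, List.cons_append, List.tail_cons, List.append_assoc]
        simp only [show ∀ m : List (List (String × String)), PySem.List.pyGetD (x1 :: m) 0 [] = x1
          from fun m => by simp [PySem.List.pyGetD], hx1, hrun]
        have hlen : PySem.List.len (x1 :: t1) = (t1.length : Int) + 1 := by
          simp [PySem.List.len]
        simp only [hlen]
        rcases Int.lt_or_le (1 + (t1.length:Int)) 2 with hlt | hle
        · have ht1 : t1 = [] := by
            cases t1 with
            | nil => rfl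
            | cons a b => simp at hlt; omega
          subst ht1
          simp
        · simp [Int.add_comm, show (2:Int) ≤ (t1.length:Int) + 1 from by omega]
    · -- criticals lead
      have hx0 : sevRank x0 = 0 := m0 x0 (by simp [hc0])
      have hrun : runFrom 0 (t0 ++ (F1 ++ (F2 ++ F3))) = (t0.length : Int) :=
        runFrom_append 0 t0 (F1 ++ (F2 ++ F3)) (fun y hy => m0 y (by simp [hc0, hy]))
          (fun y hy => by
            rcases List.mem_append.1 hy with h | h
            · simp [m1 y h]
            · rcases List.mem_append.1 h with h' | h'
              · simp [m2 y h']
              · simp [m3 y h'])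
      simp only [List.cons_append, List.tail_cons, List.append_assoc]
      simp only [show ∀ m : List (List (String × String)), PySem.List.pyGetD (x0 :: m) 0 [] = x0
        from fun m => by simp [PySem.List.pyGetD], hx0, hrun]
      have hlen : PySem.List.len (x0 :: t0) = (t0.length : Int) + 1 := by
        simp [PySem.List.len]
      simp only [hlen]
      simp [Int.add_comm]
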